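-- pv_equiv track=rewrite | github.com/ainasofeahyusoff/Part7_WIA2005 | Part7.py | unscramble_word
-- ===== SOURCE A (Python) =====
-- dictionary = ["That", "Person", "Has", "Motive"]
--
-- def unscramble_word(word):
--     sorted_word = sorted(word)
--     unscrambled_words = []
--
--     for dict_word in dictionary:
--         sorted_dict_word = sorted(dict_word)
--         if sorted_dict_word == sorted_word:
--             unscrambled_words.append(dict_word)
--
--     return unscrambled_words
-- ===== SOURCE B (Python) =====
-- dictionary = ["That", "Person", "Has", "Motive"]
--
-- # Precomputed once: signature -> dictionary words with that signature, in dictionary order.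
-- anagram_index = {}
-- for _w in dictionary:
--     anagram_index.setdefault(tuple(sorted(_w)), []).append(_w)
--
-- def unscramble_word(word):
--     return list(anagram_index.get(tuple(sorted(word)), []))
-- ===== Notes on version B (the rewrite author's own statement) =====
-- stated objective: idiomatic
-- what changed: Replaces the per-call scan of the dictionary (sorting each entry every call) by a signature index built once at module level; each call is one sort of the input plus one hash lookup.
import Mathlib
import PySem

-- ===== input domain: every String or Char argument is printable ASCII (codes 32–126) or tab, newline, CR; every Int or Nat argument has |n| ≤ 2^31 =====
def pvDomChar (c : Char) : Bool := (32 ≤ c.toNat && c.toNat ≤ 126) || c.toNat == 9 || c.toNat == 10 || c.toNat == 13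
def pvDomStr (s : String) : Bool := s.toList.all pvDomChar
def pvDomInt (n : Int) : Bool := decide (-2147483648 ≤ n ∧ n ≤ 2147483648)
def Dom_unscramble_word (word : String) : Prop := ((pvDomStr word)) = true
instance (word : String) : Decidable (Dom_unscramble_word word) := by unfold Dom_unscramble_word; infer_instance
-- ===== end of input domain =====

-- B replaces A's per-call scan over the dictionary with a signature index built once and a single lookup per call (idiomatic; same return values).
-- ===== PORT A =====
-- Python global: dictionary = ["That", "Person", "Has", "Motive"]
def pvDictionary : List String := ["That", "Person", "Has", "Motive"]

def unscramble_word (word : String) : List String :=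
  let sorted_word := PySem.List.sorted word.toList (fun c => c) false
  let unscrambled_words : List String := []
  pvDictionary.foldl (fun unscrambled_words dict_word =>
    let sorted_dict_word := PySem.List.sorted dict_word.toList (fun c => c) false
    if sorted_dict_word = sorted_word then unscrambled_words ++ [dict_word]
    else unscrambled_words) unscrambled_words

-- ===== PORT B =====
-- B: signature index built once at module level, lookup per call (list(...) copy is the identity here)
def pvAnagramIndex : PySem.Dict (List Char) (List String) :=
  pvDictionary.foldl (fun d w =>
    let key := PySem.List.sorted w.toList (fun c => c) false
    d.insert key ((d.getD key []) ++ [w])) PySem.Dict.empty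

def unscramble_word_alt (word : String) : List String :=
  pvAnagramIndex.getD (PySem.List.sorted word.toList (fun c => c) false) []

-- ===== PRECONDITION & SPEC =====
def Spec_unscramble_word (word : String) (out : List String) : Prop := out = unscramble_word_alt word
instance (word : String) (out : List String) : Decidable (Spec_unscramble_word word out) := by unfold Spec_unscramble_word; infer_instance

-- ===== CLAIM (what is proved, stated in full; the proofs are below) =====
def Claim_equal_unscramble_word : Prop := ∀ (word : String), Dom_unscramble_word word → Spec_unscramble_word word (unscramble_word word)

-- ===== LEMMAS AND PROOFS =====

-- ===== VERDICT (by name: the statement is the Claim_ definition above) =====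
theorem pvAnagramIndex_eq : pvAnagramIndex = PySem.Dict.mk
    [(['T','a','h','t'], ["That"]), (['P','e','n','o','r','s'], ["Person"]),
     (['H','a','s'], ["Has"]), (['M','e','i','o','t','v'], ["Motive"])] := by decide

theorem pvSortThat : PySem.List.sorted "That".toList (fun c => c) false = ['T','a','h','t'] := by decide
theorem pvSortPerson : PySem.List.sorted "Person".toList (fun c => c) false = ['P','e','n','o','r','s'] := by decide
theorem pvSortHas : PySem.List.sorted "Has".toList (fun c => c) false = ['H','a','s'] := by decide
theorem pvSortMotive : PySem.List.sorted "Motive".toList (fun c => c) false = ['M','e','i','o','t','v'] := by decide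

theorem unscramble_word_spec : Claim_equal_unscramble_word := by
  intro word _
  show unscramble_word word = unscramble_word_alt word
  unfold unscramble_word unscramble_word_alt
  rw [pvAnagramIndex_eq]
  simp only [pvDictionary, List.foldl, PySem.Dict.getD, PySem.Dict.get?_mk_cons,
    pvSortThat, pvSortPerson, pvSortHas, pvSortMotive, beq_iff_eq]
  generalize PySem.List.sorted word.toList (fun c => c) false = s
  split_ifs <;> try rfl
  all_goals
    (rename_i a b c d
     first
       | exact absurd (a.trans b.symm) (by decide)
       | exact absurd (a.trans c.symm) (by decide)
       | exact absurd (a.trans d.symm) (by decide)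
       | exact absurd (b.trans c.symm) (by decide)
       | exact absurd (b.trans d.symm) (by decide)
       | exact absurd (c.trans d.symm) (by decide))
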